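-- pv_equiv track=rewrite | github.com/suryapr3/Jenkins | src/rcs_fw/ipcommon/solstice/tables.py | print_data_values
-- ===== SOURCE A (Python) =====
-- def print_data_values(bitFieldNamearray, data_row, rowsPerIndex, parse_dict, subDim):
--     filtered_data = []
--     new_data = []
--     index_array_length = len(bitFieldNamearray)
--     data_index = 0
--     index = 0
--     count = 0
--     rowsPerIndex = int(rowsPerIndex)
--     new_dict = {}
--     for i, data in enumerate(data_row):
--         indices = bitFieldNamearray[i % index_array_length]
--         filtered_subarray = [data[j] for j in indices]
--         filtered_data.append(filtered_subarray)
--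
--     for index, ind in enumerate(range(0, len(filtered_data), rowsPerIndex)):
--         # Combine the mini arrays in the current group
--         combined_array = [item for sublist in filtered_data[ind:ind + rowsPerIndex] for item in sublist]
--         new_data.append((index, combined_array))
--     new_dict[subDim] = new_data
--     return new_dict
-- ===== SOURCE B (Python) =====
-- def print_data_values(bitFieldNamearray, data_row, rowsPerIndex, parse_dict, subDim):
--     rowsPerIndex = int(rowsPerIndex)
--     m = len(bitFieldNamearray)
--     n = len(data_row)
--     new_data = []
--     for index, start in enumerate(range(0, n, rowsPerIndex)):
--         combined = []
--         for row_pos in range(start, min(start + rowsPerIndex, n)):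
--             row = data_row[row_pos]
--             combined.extend(row[j] for j in bitFieldNamearray[row_pos % m])
--         new_data.append((index, combined))
--     return {subDim: new_data}
-- ===== Notes on version B (the rewrite author's own statement) =====
-- stated objective: alternative
-- what changed: B fuses A's two passes (build a filtered copy of every row, then regroup the filtered list into chunks) into a single loop over chunk starts that filters and flattens each window inline, never materialising the intermediate filtered_data list.
import Mathlib
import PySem

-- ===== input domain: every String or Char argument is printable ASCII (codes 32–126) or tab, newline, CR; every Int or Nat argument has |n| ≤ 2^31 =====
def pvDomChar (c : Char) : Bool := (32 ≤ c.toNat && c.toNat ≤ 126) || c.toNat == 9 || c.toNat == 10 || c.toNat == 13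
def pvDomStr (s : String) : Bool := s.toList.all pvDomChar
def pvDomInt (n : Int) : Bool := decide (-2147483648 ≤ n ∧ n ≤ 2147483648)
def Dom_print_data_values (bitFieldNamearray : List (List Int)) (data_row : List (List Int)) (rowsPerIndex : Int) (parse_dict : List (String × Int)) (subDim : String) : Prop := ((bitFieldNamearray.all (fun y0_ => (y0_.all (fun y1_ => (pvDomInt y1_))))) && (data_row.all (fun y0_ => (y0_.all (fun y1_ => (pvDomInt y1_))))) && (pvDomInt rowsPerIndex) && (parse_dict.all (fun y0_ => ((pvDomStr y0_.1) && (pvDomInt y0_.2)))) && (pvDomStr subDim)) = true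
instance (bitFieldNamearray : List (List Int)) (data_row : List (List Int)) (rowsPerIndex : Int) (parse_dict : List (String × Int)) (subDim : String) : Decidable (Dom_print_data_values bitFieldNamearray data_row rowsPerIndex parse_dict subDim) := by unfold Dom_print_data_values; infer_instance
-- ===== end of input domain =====

-- B fuses A's two passes (filter every row, then regroup the filtered list) into one loop
-- over the chunk starts that filters and flattens each window inline; objective: alternative
-- decomposition, no intermediate filtered list, same return value wherever A returns.

-- ===== PORT A =====
def print_data_values (bitFieldNamearray : List (List Int)) (data_row : List (List Int)) (rowsPerIndex : Int) (parse_dict : List (String × Int)) (subDim : String) : List (String × List (Int × List Int)) :=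
  let index_array_length : Int := (bitFieldNamearray.length : Int)
  let filtered_data : List (List Int) :=
    (PySem.List.enumerate data_row).map (fun p =>
      let indices := (PySem.List.pyGet? bitFieldNamearray (PySem.Int.mod p.1 index_array_length)).getD []
      indices.map (fun j => (PySem.List.pyGet? p.2 j).getD 0))
  let new_data : List (Int × List Int) :=
    (PySem.List.enumerate (PySem.List.pyRange 0 (filtered_data.length : Int) rowsPerIndex)).map (fun p =>
      (p.1, (PySem.List.slice filtered_data (some p.2) (some (p.2 + rowsPerIndex))).flatten))
  [(subDim, new_data)]

-- ===== PORT B =====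
def print_data_values_alt (bitFieldNamearray : List (List Int)) (data_row : List (List Int)) (rowsPerIndex : Int) (parse_dict : List (String × Int)) (subDim : String) : List (String × List (Int × List Int)) :=
  let m : Int := (bitFieldNamearray.length : Int)
  let n : Int := (data_row.length : Int)
  let new_data : List (Int × List Int) :=
    (PySem.List.enumerate (PySem.List.pyRange 0 n rowsPerIndex)).map (fun p =>
      (p.1,
        (PySem.List.pyRange p.2 (min (p.2 + rowsPerIndex) n) 1).flatMap (fun row_pos =>
          let row := (PySem.List.pyGet? data_row row_pos).getD []
          ((PySem.List.pyGet? bitFieldNamearray (PySem.Int.mod row_pos m)).getD []).map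
            (fun j => (PySem.List.pyGet? row j).getD 0))))
  [(subDim, new_data)]

-- ===== PRECONDITION & SPEC =====
-- Pre_ excludes exactly the inputs where Python A raises: rowsPerIndex = 0 (ValueError from
-- range), an empty bitFieldNamearray with a non-empty data_row (ZeroDivisionError from i % 0),
-- and any selector index out of Python's (negative-inclusive) range for its row (IndexError).
def Pre_print_data_values (bitFieldNamearray : List (List Int)) (data_row : List (List Int)) (rowsPerIndex : Int) (parse_dict : List (String × Int)) (subDim : String) : Prop :=
  rowsPerIndex ≠ 0 ∧ (data_row = [] ∨ bitFieldNamearray ≠ []) ∧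
  ∀ i : Nat, i < data_row.length →
    ∀ j ∈ bitFieldNamearray.getD (i % bitFieldNamearray.length) [],
      -((data_row.getD i []).length : Int) ≤ j ∧ j < ((data_row.getD i []).length : Int)
instance (bitFieldNamearray : List (List Int)) (data_row : List (List Int)) (rowsPerIndex : Int) (parse_dict : List (String × Int)) (subDim : String) : Decidable (Pre_print_data_values bitFieldNamearray data_row rowsPerIndex parse_dict subDim) := by unfold Pre_print_data_values; infer_instance

def pvWitness_print_data_values : List (List Int) × List (List Int) × Int × (List (String × Int)) × String :=
  ([[0, 1], [1]], [[3, 4], [5, 6], [7, 8], [9, 10]], 2, [("k", 1)], "dim")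

def Spec_print_data_values (bitFieldNamearray : List (List Int)) (data_row : List (List Int)) (rowsPerIndex : Int) (parse_dict : List (String × Int)) (subDim : String) (out : List (String × List (Int × List Int))) : Prop := out = print_data_values_alt bitFieldNamearray data_row rowsPerIndex parse_dict subDim
instance (bitFieldNamearray : List (List Int)) (data_row : List (List Int)) (rowsPerIndex : Int) (parse_dict : List (String × Int)) (subDim : String) (out : List (String × List (Int × List Int))) : Decidable (Spec_print_data_values bitFieldNamearray data_row rowsPerIndex parse_dict subDim out) := by unfold Spec_print_data_values; infer_instance

-- ===== CLAIM (what is proved, stated in full; the proofs are below) =====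
def Claim_equal_print_data_values : Prop := ∀ (bitFieldNamearray : List (List Int)) (data_row : List (List Int)) (rowsPerIndex : Int) (parse_dict : List (String × Int)) (subDim : String), Dom_print_data_values bitFieldNamearray data_row rowsPerIndex parse_dict subDim → Pre_print_data_values bitFieldNamearray data_row rowsPerIndex parse_dict subDim → Spec_print_data_values bitFieldNamearray data_row rowsPerIndex parse_dict subDim (print_data_values bitFieldNamearray data_row rowsPerIndex parse_dict subDim)
-- ===== LEMMAS AND PROOFS =====

-- For nonpositive step and nonnegative stop, range(0, n, step) is empty.
theorem pyRange_zero_of_nonpos (r n : Int) (hr : r ≤ 0) (hn : 0 ≤ n) :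
    PySem.List.pyRange 0 n r = [] := by
  simp only [PySem.List.pyRange]
  split_ifs <;> simp_all <;> omega

-- The drop/take window of range(0, n) is range(a, min (a+r) n).
theorem drop_take_pyRange (a r n : Int) (ha : 0 ≤ a) (hr : 0 < r) :
    ((PySem.List.pyRange 0 n 1).drop a.toNat).take ((a + r).toNat - a.toNat)
      = PySem.List.pyRange a (min (a + r) n) 1 := by
  apply List.ext_getElem?
  intro i
  simp only [List.getElem?_take, List.getElem?_drop, PySem.List.getElem?_pyRange_one]
  split_ifs <;> (try rfl) <;> (try (exfalso; omega)) <;> (congr 1; omega)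

-- A's filtered_data is the per-position selector applied along range(0, len(data_row)).
theorem filtered_eq (bfn data_row : List (List Int)) :
    (PySem.List.enumerate data_row).map (fun p =>
        ((PySem.List.pyGet? bfn (PySem.Int.mod p.1 (bfn.length : Int))).getD []).map
          (fun j => (PySem.List.pyGet? p.2 j).getD 0))
      = (PySem.List.pyRange 0 (data_row.length : Int) 1).map (fun i =>
        ((PySem.List.pyGet? bfn (PySem.Int.mod i (bfn.length : Int))).getD []).map
          (fun j => (PySem.List.pyGet? ((PySem.List.pyGet? data_row i).getD []) j).getD 0)) := by
  rw [PySem.List.enumerate_eq_map_pyRange data_row ([] : List Int), List.map_map]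
  simp only [PySem.List.len_eq]
  refine List.map_congr_left ?_
  intro i _
  simp [PySem.List.pyGetD, Function.comp]

theorem print_data_values_spec : Claim_equal_print_data_values := by
  intro bfn data_row r pd subDim _ _
  unfold Spec_print_data_values print_data_values print_data_values_alt
  simp only []
  rw [filtered_eq]
  congr 1
  have hlen : (((PySem.List.pyRange 0 ((data_row.length : Int)) 1).map (fun i =>
      ((PySem.List.pyGet? bfn (PySem.Int.mod i (bfn.length : Int))).getD []).map
        (fun j => (PySem.List.pyGet? ((PySem.List.pyGet? data_row i).getD []) j).getD 0))).length : Int)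
      = (data_row.length : Int) := by
    simp [PySem.List.length_pyRange_one]
  rw [hlen]
  congr 1
  refine List.map_congr_left ?_
  intro p hp
  rcases (PySem.List.mem_enumerate_iff _ _ _).1 hp with ⟨k, hk, rfl⟩
  simp only
  congr 1
  rcases lt_or_ge 0 r with hr | hr
  · have hmem : (PySem.List.pyRange 0 ((data_row.length : Int)) r)[k] ∈
        PySem.List.pyRange 0 ((data_row.length : Int)) r := List.getElem_mem hk
    have ha : 0 ≤ (PySem.List.pyRange 0 ((data_row.length : Int)) r)[k] :=
      ((PySem.List.mem_pyRange_iff_of_pos hr _).1 hmem).1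
    set a := (PySem.List.pyRange 0 ((data_row.length : Int)) r)[k] with hadef
    rw [PySem.List.slice_toNat _ ha (by omega)]
    rw [← List.map_drop, ← List.map_take, drop_take_pyRange a r _ ha hr]
    rw [List.flatMap_def]
  · exfalso
    rw [pyRange_zero_of_nonpos r _ hr (by positivity)] at hk
    simp at hk
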